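-- pv_equiv track=rewrite | github.com/renatahodovan/grammarinator | grammarinator/runtime/grammarinator.py | printable_ranges
-- ===== SOURCE A (Python) =====
-- def printable_ranges(lower_bound, upper_bound):
--     ranges = []
--     range_start = None
--     for c in range(lower_bound, upper_bound):
--         if chr(c).isprintable():
--             if range_start is None:
--                 range_start = c
--         else:
--             if range_start is not None:
--                 ranges.append((range_start, c))
--                 range_start = None
--
--     if range_start is not None:
--         ranges.append((range_start, upper_bound))
--     return ranges
-- ===== SOURCE B (Python) =====
-- # B: delta-compressed table of the printable code-point ranges, built once; a query
-- # walks the table with a running position and clips each decoded range to [lower_bound, upper_bound).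
-- _DELTA_RANGES = [
--     (32, 95), (34, 12), (1, 714), (2, 6), (4, 7), (1, 1), (1, 20), (1, 397), (1, 38), (2, 50), (2, 3), (1, 55),
--     (8, 27), (4, 6), (17, 22), (1, 192), (1, 48), (2, 59), (2, 101), (14, 59), (2, 49), (2, 15), (1, 28), (2, 1),
--     (1, 11), (5, 31), (9, 74), (1, 161), (1, 8), (2, 2), (2, 22), (1, 7), (1, 1), (3, 4), (2, 9), (2, 2),
--     (2, 4), (8, 1), (4, 2), (1, 5), (2, 25), (2, 3), (1, 6), (4, 2), (2, 22), (1, 7), (1, 2), (1, 2),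
--     (1, 2), (2, 1), (1, 5), (4, 2), (2, 3), (3, 1), (7, 4), (1, 1), (7, 17), (10, 3), (1, 9), (1, 3),
--     (1, 22), (1, 7), (1, 2), (1, 5), (2, 10), (1, 3), (1, 3), (2, 1), (15, 4), (2, 12), (7, 7), (1, 3),
--     (1, 8), (2, 2), (2, 22), (1, 7), (1, 2), (1, 5), (2, 9), (2, 2), (2, 3), (7, 3), (4, 2), (1, 5),
--     (2, 18), (10, 2), (1, 6), (3, 3), (1, 4), (3, 2), (1, 1), (1, 2), (3, 2), (3, 3), (3, 12), (4, 5),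
--     (3, 3), (1, 4), (2, 1), (6, 1), (14, 21), (5, 13), (1, 3), (1, 23), (1, 16), (2, 9), (1, 3), (1, 4),
--     (7, 2), (1, 3), (2, 1), (2, 4), (2, 10), (7, 22), (1, 3), (1, 23), (1, 10), (1, 5), (2, 9), (1, 3),
--     (1, 4), (7, 2), (6, 2), (1, 4), (2, 10), (1, 2), (13, 13), (1, 3), (1, 51), (1, 3), (1, 6), (4, 16),
--     (2, 26), (1, 3), (1, 18), (3, 24), (1, 9), (1, 1), (2, 7), (3, 1), (4, 6), (1, 1), (1, 8), (6, 10),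
--     (2, 3), (12, 58), (4, 29), (37, 2), (1, 1), (1, 5), (1, 24), (1, 1), (1, 23), (2, 5), (1, 1), (1, 6),
--     (2, 10), (2, 4), (32, 72), (1, 36), (4, 39), (1, 36), (1, 15), (1, 13), (37, 198), (1, 1), (5, 1), (2, 377),
--     (1, 4), (2, 7), (1, 1), (1, 4), (2, 41), (1, 4), (2, 33), (1, 4), (2, 7), (1, 1), (1, 4), (2, 15),
--     (1, 57), (1, 4), (2, 67), (2, 32), (3, 26), (6, 86), (2, 6), (2, 640), (1, 28), (3, 89), (7, 22), (9, 24),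
--     (9, 20), (12, 13), (1, 3), (1, 2), (12, 94), (2, 10), (6, 10), (6, 14), (1, 11), (6, 89), (7, 43), (5, 70),
--     (10, 31), (1, 12), (4, 12), (4, 1), (3, 42), (2, 5), (11, 44), (4, 26), (6, 11), (3, 62), (2, 65), (1, 29),
--     (2, 11), (6, 10), (6, 14), (2, 31), (49, 77), (3, 47), (1, 116), (8, 60), (3, 15), (3, 60), (7, 43), (2, 11),
--     (8, 43), (5, 534), (2, 6), (2, 38), (2, 6), (2, 8), (1, 1), (1, 1), (1, 1), (1, 31), (2, 53), (1, 15),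
--     (1, 14), (2, 6), (1, 19), (2, 3), (1, 9), (17, 24), (8, 47), (17, 2), (2, 27), (1, 13), (3, 33), (15, 33),
--     (15, 140), (4, 663), (25, 11), (21, 1812), (2, 32), (1, 349), (5, 45), (1, 1), (5, 1), (2, 56), (7, 2), (14, 24),
--     (9, 7), (1, 7), (1, 7), (1, 7), (1, 7), (1, 7), (1, 7), (1, 7), (1, 126), (34, 26), (1, 89), (12, 214),
--     (26, 12), (5, 63), (1, 86), (2, 103), (5, 43), (1, 94), (1, 84), (12, 47), (1, 29293), (3, 55), (9, 348), (20, 184),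
--     (8, 203), (5, 2), (1, 1), (1, 5), (24, 59), (3, 10), (6, 56), (8, 70), (8, 12), (6, 116), (11, 30), (3, 78),
--     (1, 11), (4, 33), (1, 55), (9, 14), (2, 10), (2, 103), (24, 28), (10, 6), (2, 6), (2, 6), (9, 7), (1, 7),
--     (1, 60), (4, 126), (2, 10), (6, 11172), (12, 23), (4, 49), (8452, 366), (2, 106), (38, 7), (12, 5), (5, 26), (1, 5),
--     (1, 1), (1, 2), (1, 2), (1, 125), (16, 445), (2, 54), (7, 1), (32, 42), (6, 51), (1, 19), (1, 4), (4, 5),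
--     (1, 135), (4, 190), (3, 6), (2, 6), (2, 6), (2, 3), (3, 7), (1, 7), (13, 2), (2, 12), (1, 26), (1, 19),
--     (1, 2), (1, 15), (2, 14), (34, 123), (5, 3), (4, 45), (3, 88), (1, 13), (3, 1), (47, 46), (130, 29), (3, 49),
--     (15, 28), (4, 36), (9, 30), (5, 43), (5, 30), (1, 37), (4, 14), (42, 158), (2, 10), (6, 36), (4, 36), (4, 40),
--     (8, 52), (11, 12), (1, 15), (1, 7), (1, 2), (1, 11), (1, 15), (1, 7), (1, 2), (67, 311), (9, 22), (10, 8),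
--     (24, 6), (1, 42), (1, 9), (69, 6), (2, 1), (1, 44), (1, 2), (3, 1), (2, 23), (1, 72), (8, 9), (48, 19),
--     (1, 2), (5, 33), (3, 27), (5, 1), (64, 56), (4, 20), (2, 50), (1, 2), (5, 8), (1, 3), (1, 29), (2, 3),
--     (4, 10), (7, 9), (7, 64), (32, 39), (4, 12), (9, 54), (3, 29), (2, 27), (5, 26), (7, 4), (12, 7), (80, 73),
--     (55, 51), (13, 51), (7, 46), (8, 10), (294, 31), (1, 42), (1, 3), (2, 2), (78, 40), (8, 42), (22, 26), (38, 28),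
--     (20, 23), (9, 78), (4, 36), (9, 62), (1, 5), (13, 25), (7, 10), (6, 53), (1, 18), (8, 39), (9, 96), (1, 20),
--     (11, 18), (1, 44), (65, 7), (1, 1), (1, 4), (1, 15), (1, 11), (6, 59), (5, 10), (6, 4), (1, 8), (2, 2),
--     (2, 22), (1, 7), (1, 2), (1, 5), (1, 10), (2, 2), (2, 3), (2, 1), (6, 1), (5, 7), (2, 7), (3, 5),
--     (139, 92), (1, 5), (30, 72), (8, 10), (166, 54), (2, 38), (34, 69), (11, 10), (6, 13), (19, 58), (6, 10), (54, 27),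
--     (2, 15), (4, 23), (185, 60), (100, 83), (12, 8), (2, 1), (2, 8), (1, 2), (1, 30), (1, 2), (2, 12), (9, 10),
--     (70, 8), (2, 46), (2, 11), (27, 72), (8, 83), (13, 73), (263, 9), (1, 45), (1, 14), (10, 29), (3, 32), (2, 22),
--     (1, 14), (73, 7), (1, 2), (1, 44), (3, 1), (1, 2), (1, 9), (8, 10), (6, 6), (1, 2), (1, 37), (1, 2),
--     (1, 6), (7, 10), (310, 25), (183, 1), (15, 50), (13, 923), (102, 111), (1, 5), (11, 196), (2636, 99), (13, 1071), (4049, 583),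
--     (8633, 569), (7, 31), (1, 10), (4, 81), (1, 10), (6, 30), (2, 6), (10, 70), (10, 10), (1, 7), (1, 21), (5, 19),
--     (688, 91), (101, 75), (4, 57), (7, 17), (64, 5), (11, 2), (14, 6136), (8, 1238), (42, 9), (8935, 4), (1, 7), (1, 2),
--     (1, 291), (45, 3), (17, 4), (8, 396), (2308, 107), (5, 13), (3, 9), (7, 10), (2, 4), (4704, 46), (2, 23), (9, 116),
--     (60, 246), (10, 39), (2, 74), (8, 112), (21, 70), (154, 20), (12, 87), (9, 25), (135, 85), (1, 71), (1, 2), (2, 1),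
--     (2, 2), (2, 4), (1, 12), (1, 1), (1, 7), (1, 65), (1, 4), (2, 8), (1, 7), (1, 28), (1, 4), (1, 5),
--     (1, 1), (3, 7), (1, 340), (2, 292), (2, 702), (15, 5), (1, 15), (1104, 31), (225, 7), (1, 17), (2, 7), (1, 2),
--     (1, 5), (213, 45), (3, 14), (2, 10), (4, 2), (320, 31), (17, 58), (5, 1), (1248, 7), (1, 4), (1, 2), (1, 15),
--     (1, 197), (2, 16), (41, 76), (4, 10), (4, 2), (785, 68), (76, 61), (194, 4), (1, 27), (1, 2), (1, 1), (2, 1),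
--     (1, 10), (1, 4), (1, 1), (1, 1), (6, 1), (4, 1), (1, 1), (1, 1), (1, 3), (1, 2), (1, 1), (2, 1),
--     (1, 1), (1, 1), (1, 1), (1, 1), (1, 2), (1, 1), (2, 4), (1, 7), (1, 4), (1, 4), (1, 1), (1, 10),
--     (1, 17), (5, 3), (1, 5), (1, 17), (52, 2), (270, 44), (4, 100), (12, 15), (2, 15), (1, 15), (1, 37), (10, 174),
--     (56, 29), (13, 44), (4, 9), (7, 2), (14, 6), (154, 984), (5, 16), (3, 13), (3, 116), (12, 89), (7, 12), (4, 1),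
--     (15, 12), (4, 56), (8, 10), (6, 40), (8, 30), (2, 2), (78, 340), (12, 14), (2, 5), (3, 5), (3, 7), (9, 29),
--     (3, 11), (5, 6), (10, 10), (6, 8), (8, 7), (9, 147), (1, 55), (37, 10), (1030, 42720), (32, 4153), (7, 222), (2, 5762),
--     (14, 7473), (3103, 542), (1506, 4939), (716213, 240),
-- ]
--
--
-- def printable_ranges(lower_bound, upper_bound):
--     result = []
--     pos = 0
--     for gap, length in _DELTA_RANGES:
--         start = pos + gap
--         end = start + length
--         pos = end
--         lo = start if start > lower_bound else lower_bound
--         hi = end if end < upper_bound else upper_bound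
--         if lo < hi:
--             result.append((lo, hi))
--     return result
-- ===== Notes on version B (the rewrite author's own statement) =====
-- stated objective: faster
-- what changed: Instead of testing every code point in [lower_bound, upper_bound) with chr(c).isprintable(), B walks a delta-compressed table of the printable code-point ranges (precomputed once), decoding each (gap, length) entry with a running position and clipping it to [lower_bound, upper_bound).
import Mathlib
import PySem

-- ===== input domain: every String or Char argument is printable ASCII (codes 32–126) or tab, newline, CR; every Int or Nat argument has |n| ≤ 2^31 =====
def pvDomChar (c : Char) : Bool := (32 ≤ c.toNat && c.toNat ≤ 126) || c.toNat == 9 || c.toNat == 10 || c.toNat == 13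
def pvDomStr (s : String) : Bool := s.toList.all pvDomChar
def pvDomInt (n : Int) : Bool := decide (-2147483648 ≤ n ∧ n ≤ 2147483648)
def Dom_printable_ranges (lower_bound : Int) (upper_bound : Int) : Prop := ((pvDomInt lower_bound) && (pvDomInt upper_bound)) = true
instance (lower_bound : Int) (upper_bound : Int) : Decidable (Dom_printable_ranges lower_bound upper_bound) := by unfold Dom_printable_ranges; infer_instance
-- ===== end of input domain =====

-- B replaces A's per-code-point scan by one pass over a delta-compressed table of the printable
-- code-point ranges (built once), decoding with a running position and clipping to the query (objective: faster).

-- ===== PORT A =====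
-- Hand port of Python's chr(c).isprintable() (PySem has no Unicode primitive): pvTable lists the
-- maximal printable code-point ranges of Python 3.11's Unicode database, so pvPrintable is exact
-- for 0 <= c < 0x110000 (chr raises outside, excluded by Pre_).
def pvTable : List (Int × Int) := [
  (32, 127), (161, 173), (174, 888), (890, 896), (900, 907), (908, 909), (910, 930), (931, 1328),
  (1329, 1367), (1369, 1419), (1421, 1424), (1425, 1480), (1488, 1515), (1519, 1525), (1542, 1564), (1565, 1757),
  (1758, 1806), (1808, 1867), (1869, 1970), (1984, 2043), (2045, 2094), (2096, 2111), (2112, 2140), (2142, 2143),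
  (2144, 2155), (2160, 2191), (2200, 2274), (2275, 2436), (2437, 2445), (2447, 2449), (2451, 2473), (2474, 2481),
  (2482, 2483), (2486, 2490), (2492, 2501), (2503, 2505), (2507, 2511), (2519, 2520), (2524, 2526), (2527, 2532),
  (2534, 2559), (2561, 2564), (2565, 2571), (2575, 2577), (2579, 2601), (2602, 2609), (2610, 2612), (2613, 2615),
  (2616, 2618), (2620, 2621), (2622, 2627), (2631, 2633), (2635, 2638), (2641, 2642), (2649, 2653), (2654, 2655),
  (2662, 2679), (2689, 2692), (2693, 2702), (2703, 2706), (2707, 2729), (2730, 2737), (2738, 2740), (2741, 2746),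
  (2748, 2758), (2759, 2762), (2763, 2766), (2768, 2769), (2784, 2788), (2790, 2802), (2809, 2816), (2817, 2820),
  (2821, 2829), (2831, 2833), (2835, 2857), (2858, 2865), (2866, 2868), (2869, 2874), (2876, 2885), (2887, 2889),
  (2891, 2894), (2901, 2904), (2908, 2910), (2911, 2916), (2918, 2936), (2946, 2948), (2949, 2955), (2958, 2961),
  (2962, 2966), (2969, 2971), (2972, 2973), (2974, 2976), (2979, 2981), (2984, 2987), (2990, 3002), (3006, 3011),
  (3014, 3017), (3018, 3022), (3024, 3025), (3031, 3032), (3046, 3067), (3072, 3085), (3086, 3089), (3090, 3113),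
  (3114, 3130), (3132, 3141), (3142, 3145), (3146, 3150), (3157, 3159), (3160, 3163), (3165, 3166), (3168, 3172),
  (3174, 3184), (3191, 3213), (3214, 3217), (3218, 3241), (3242, 3252), (3253, 3258), (3260, 3269), (3270, 3273),
  (3274, 3278), (3285, 3287), (3293, 3295), (3296, 3300), (3302, 3312), (3313, 3315), (3328, 3341), (3342, 3345),
  (3346, 3397), (3398, 3401), (3402, 3408), (3412, 3428), (3430, 3456), (3457, 3460), (3461, 3479), (3482, 3506),
  (3507, 3516), (3517, 3518), (3520, 3527), (3530, 3531), (3535, 3541), (3542, 3543), (3544, 3552), (3558, 3568),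
  (3570, 3573), (3585, 3643), (3647, 3676), (3713, 3715), (3716, 3717), (3718, 3723), (3724, 3748), (3749, 3750),
  (3751, 3774), (3776, 3781), (3782, 3783), (3784, 3790), (3792, 3802), (3804, 3808), (3840, 3912), (3913, 3949),
  (3953, 3992), (3993, 4029), (4030, 4045), (4046, 4059), (4096, 4294), (4295, 4296), (4301, 4302), (4304, 4681),
  (4682, 4686), (4688, 4695), (4696, 4697), (4698, 4702), (4704, 4745), (4746, 4750), (4752, 4785), (4786, 4790),
  (4792, 4799), (4800, 4801), (4802, 4806), (4808, 4823), (4824, 4881), (4882, 4886), (4888, 4955), (4957, 4989),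
  (4992, 5018), (5024, 5110), (5112, 5118), (5120, 5760), (5761, 5789), (5792, 5881), (5888, 5910), (5919, 5943),
  (5952, 5972), (5984, 5997), (5998, 6001), (6002, 6004), (6016, 6110), (6112, 6122), (6128, 6138), (6144, 6158),
  (6159, 6170), (6176, 6265), (6272, 6315), (6320, 6390), (6400, 6431), (6432, 6444), (6448, 6460), (6464, 6465),
  (6468, 6510), (6512, 6517), (6528, 6572), (6576, 6602), (6608, 6619), (6622, 6684), (6686, 6751), (6752, 6781),
  (6783, 6794), (6800, 6810), (6816, 6830), (6832, 6863), (6912, 6989), (6992, 7039), (7040, 7156), (7164, 7224),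
  (7227, 7242), (7245, 7305), (7312, 7355), (7357, 7368), (7376, 7419), (7424, 7958), (7960, 7966), (7968, 8006),
  (8008, 8014), (8016, 8024), (8025, 8026), (8027, 8028), (8029, 8030), (8031, 8062), (8064, 8117), (8118, 8133),
  (8134, 8148), (8150, 8156), (8157, 8176), (8178, 8181), (8182, 8191), (8208, 8232), (8240, 8287), (8304, 8306),
  (8308, 8335), (8336, 8349), (8352, 8385), (8400, 8433), (8448, 8588), (8592, 9255), (9280, 9291), (9312, 11124),
  (11126, 11158), (11159, 11508), (11513, 11558), (11559, 11560), (11565, 11566), (11568, 11624), (11631, 11633), (11647, 11671),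
  (11680, 11687), (11688, 11695), (11696, 11703), (11704, 11711), (11712, 11719), (11720, 11727), (11728, 11735), (11736, 11743),
  (11744, 11870), (11904, 11930), (11931, 12020), (12032, 12246), (12272, 12284), (12289, 12352), (12353, 12439), (12441, 12544),
  (12549, 12592), (12593, 12687), (12688, 12772), (12784, 12831), (12832, 42125), (42128, 42183), (42192, 42540), (42560, 42744),
  (42752, 42955), (42960, 42962), (42963, 42964), (42965, 42970), (42994, 43053), (43056, 43066), (43072, 43128), (43136, 43206),
  (43214, 43226), (43232, 43348), (43359, 43389), (43392, 43470), (43471, 43482), (43486, 43519), (43520, 43575), (43584, 43598),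
  (43600, 43610), (43612, 43715), (43739, 43767), (43777, 43783), (43785, 43791), (43793, 43799), (43808, 43815), (43816, 43823),
  (43824, 43884), (43888, 44014), (44016, 44026), (44032, 55204), (55216, 55239), (55243, 55292), (63744, 64110), (64112, 64218),
  (64256, 64263), (64275, 64280), (64285, 64311), (64312, 64317), (64318, 64319), (64320, 64322), (64323, 64325), (64326, 64451),
  (64467, 64912), (64914, 64968), (64975, 64976), (65008, 65050), (65056, 65107), (65108, 65127), (65128, 65132), (65136, 65141),
  (65142, 65277), (65281, 65471), (65474, 65480), (65482, 65488), (65490, 65496), (65498, 65501), (65504, 65511), (65512, 65519),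
  (65532, 65534), (65536, 65548), (65549, 65575), (65576, 65595), (65596, 65598), (65599, 65614), (65616, 65630), (65664, 65787),
  (65792, 65795), (65799, 65844), (65847, 65935), (65936, 65949), (65952, 65953), (66000, 66046), (66176, 66205), (66208, 66257),
  (66272, 66300), (66304, 66340), (66349, 66379), (66384, 66427), (66432, 66462), (66463, 66500), (66504, 66518), (66560, 66718),
  (66720, 66730), (66736, 66772), (66776, 66812), (66816, 66856), (66864, 66916), (66927, 66939), (66940, 66955), (66956, 66963),
  (66964, 66966), (66967, 66978), (66979, 66994), (66995, 67002), (67003, 67005), (67072, 67383), (67392, 67414), (67424, 67432),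
  (67456, 67462), (67463, 67505), (67506, 67515), (67584, 67590), (67592, 67593), (67594, 67638), (67639, 67641), (67644, 67645),
  (67647, 67670), (67671, 67743), (67751, 67760), (67808, 67827), (67828, 67830), (67835, 67868), (67871, 67898), (67903, 67904),
  (67968, 68024), (68028, 68048), (68050, 68100), (68101, 68103), (68108, 68116), (68117, 68120), (68121, 68150), (68152, 68155),
  (68159, 68169), (68176, 68185), (68192, 68256), (68288, 68327), (68331, 68343), (68352, 68406), (68409, 68438), (68440, 68467),
  (68472, 68498), (68505, 68509), (68521, 68528), (68608, 68681), (68736, 68787), (68800, 68851), (68858, 68904), (68912, 68922),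
  (69216, 69247), (69248, 69290), (69291, 69294), (69296, 69298), (69376, 69416), (69424, 69466), (69488, 69514), (69552, 69580),
  (69600, 69623), (69632, 69710), (69714, 69750), (69759, 69821), (69822, 69827), (69840, 69865), (69872, 69882), (69888, 69941),
  (69942, 69960), (69968, 70007), (70016, 70112), (70113, 70133), (70144, 70162), (70163, 70207), (70272, 70279), (70280, 70281),
  (70282, 70286), (70287, 70302), (70303, 70314), (70320, 70379), (70384, 70394), (70400, 70404), (70405, 70413), (70415, 70417),
  (70419, 70441), (70442, 70449), (70450, 70452), (70453, 70458), (70459, 70469), (70471, 70473), (70475, 70478), (70480, 70481),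
  (70487, 70488), (70493, 70500), (70502, 70509), (70512, 70517), (70656, 70748), (70749, 70754), (70784, 70856), (70864, 70874),
  (71040, 71094), (71096, 71134), (71168, 71237), (71248, 71258), (71264, 71277), (71296, 71354), (71360, 71370), (71424, 71451),
  (71453, 71468), (71472, 71495), (71680, 71740), (71840, 71923), (71935, 71943), (71945, 71946), (71948, 71956), (71957, 71959),
  (71960, 71990), (71991, 71993), (71995, 72007), (72016, 72026), (72096, 72104), (72106, 72152), (72154, 72165), (72192, 72264),
  (72272, 72355), (72368, 72441), (72704, 72713), (72714, 72759), (72760, 72774), (72784, 72813), (72816, 72848), (72850, 72872),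
  (72873, 72887), (72960, 72967), (72968, 72970), (72971, 73015), (73018, 73019), (73020, 73022), (73023, 73032), (73040, 73050),
  (73056, 73062), (73063, 73065), (73066, 73103), (73104, 73106), (73107, 73113), (73120, 73130), (73440, 73465), (73648, 73649),
  (73664, 73714), (73727, 74650), (74752, 74863), (74864, 74869), (74880, 75076), (77712, 77811), (77824, 78895), (82944, 83527),
  (92160, 92729), (92736, 92767), (92768, 92778), (92782, 92863), (92864, 92874), (92880, 92910), (92912, 92918), (92928, 92998),
  (93008, 93018), (93019, 93026), (93027, 93048), (93053, 93072), (93760, 93851), (93952, 94027), (94031, 94088), (94095, 94112),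
  (94176, 94181), (94192, 94194), (94208, 100344), (100352, 101590), (101632, 101641), (110576, 110580), (110581, 110588), (110589, 110591),
  (110592, 110883), (110928, 110931), (110948, 110952), (110960, 111356), (113664, 113771), (113776, 113789), (113792, 113801), (113808, 113818),
  (113820, 113824), (118528, 118574), (118576, 118599), (118608, 118724), (118784, 119030), (119040, 119079), (119081, 119155), (119163, 119275),
  (119296, 119366), (119520, 119540), (119552, 119639), (119648, 119673), (119808, 119893), (119894, 119965), (119966, 119968), (119970, 119971),
  (119973, 119975), (119977, 119981), (119982, 119994), (119995, 119996), (119997, 120004), (120005, 120070), (120071, 120075), (120077, 120085),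
  (120086, 120093), (120094, 120122), (120123, 120127), (120128, 120133), (120134, 120135), (120138, 120145), (120146, 120486), (120488, 120780),
  (120782, 121484), (121499, 121504), (121505, 121520), (122624, 122655), (122880, 122887), (122888, 122905), (122907, 122914), (122915, 122917),
  (122918, 122923), (123136, 123181), (123184, 123198), (123200, 123210), (123214, 123216), (123536, 123567), (123584, 123642), (123647, 123648),
  (124896, 124903), (124904, 124908), (124909, 124911), (124912, 124927), (124928, 125125), (125127, 125143), (125184, 125260), (125264, 125274),
  (125278, 125280), (126065, 126133), (126209, 126270), (126464, 126468), (126469, 126496), (126497, 126499), (126500, 126501), (126503, 126504),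
  (126505, 126515), (126516, 126520), (126521, 126522), (126523, 126524), (126530, 126531), (126535, 126536), (126537, 126538), (126539, 126540),
  (126541, 126544), (126545, 126547), (126548, 126549), (126551, 126552), (126553, 126554), (126555, 126556), (126557, 126558), (126559, 126560),
  (126561, 126563), (126564, 126565), (126567, 126571), (126572, 126579), (126580, 126584), (126585, 126589), (126590, 126591), (126592, 126602),
  (126603, 126620), (126625, 126628), (126629, 126634), (126635, 126652), (126704, 126706), (126976, 127020), (127024, 127124), (127136, 127151),
  (127153, 127168), (127169, 127184), (127185, 127222), (127232, 127406), (127462, 127491), (127504, 127548), (127552, 127561), (127568, 127570),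
  (127584, 127590), (127744, 128728), (128733, 128749), (128752, 128765), (128768, 128884), (128896, 128985), (128992, 129004), (129008, 129009),
  (129024, 129036), (129040, 129096), (129104, 129114), (129120, 129160), (129168, 129198), (129200, 129202), (129280, 129620), (129632, 129646),
  (129648, 129653), (129656, 129661), (129664, 129671), (129680, 129709), (129712, 129723), (129728, 129734), (129744, 129754), (129760, 129768),
  (129776, 129783), (129792, 129939), (129940, 129995), (130032, 130042), (131072, 173792), (173824, 177977), (177984, 178206), (178208, 183970),
  (183984, 191457), (194560, 195102), (196608, 201547), (917760, 918000)
]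

def pvPrintable (c : Int) : Bool := pvTable.any (fun r => decide (r.1 ≤ c) && decide (c < r.2))

-- loop body of A's for-loop, transliterated
def scanF (p : Int → Bool) (st : List (List Int) × Option Int) (c : Int) :
    List (List Int) × Option Int :=
  if p c then
    match st.2 with
    | none => (st.1, some c)      -- range_start = c
    | some _ => st
  else
    match st.2 with
    | some s => (st.1 ++ [[s, c]], none)   -- ranges.append((range_start, c))
    | none => st

def printable_ranges (lower_bound : Int) (upper_bound : Int) : List (List Int) :=
  match (PySem.List.pyRange lower_bound upper_bound 1).foldl (scanF pvPrintable) ([], none) with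
  | (ranges, some s) => ranges ++ [[s, upper_bound]]
  | (ranges, none) => ranges

-- ===== PORT B =====
-- B's table: each entry (gap, length) means "skip gap code points, then length printable ones";
-- decoded with a running position it yields the printable ranges.
def pvDeltas : List (Int × Int) := [
  (32, 95), (34, 12), (1, 714), (2, 6), (4, 7), (1, 1), (1, 20), (1, 397),
  (1, 38), (2, 50), (2, 3), (1, 55), (8, 27), (4, 6), (17, 22), (1, 192),
  (1, 48), (2, 59), (2, 101), (14, 59), (2, 49), (2, 15), (1, 28), (2, 1),
  (1, 11), (5, 31), (9, 74), (1, 161), (1, 8), (2, 2), (2, 22), (1, 7),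
  (1, 1), (3, 4), (2, 9), (2, 2), (2, 4), (8, 1), (4, 2), (1, 5),
  (2, 25), (2, 3), (1, 6), (4, 2), (2, 22), (1, 7), (1, 2), (1, 2),
  (1, 2), (2, 1), (1, 5), (4, 2), (2, 3), (3, 1), (7, 4), (1, 1),
  (7, 17), (10, 3), (1, 9), (1, 3), (1, 22), (1, 7), (1, 2), (1, 5),
  (2, 10), (1, 3), (1, 3), (2, 1), (15, 4), (2, 12), (7, 7), (1, 3),
  (1, 8), (2, 2), (2, 22), (1, 7), (1, 2), (1, 5), (2, 9), (2, 2),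
  (2, 3), (7, 3), (4, 2), (1, 5), (2, 18), (10, 2), (1, 6), (3, 3),
  (1, 4), (3, 2), (1, 1), (1, 2), (3, 2), (3, 3), (3, 12), (4, 5),
  (3, 3), (1, 4), (2, 1), (6, 1), (14, 21), (5, 13), (1, 3), (1, 23),
  (1, 16), (2, 9), (1, 3), (1, 4), (7, 2), (1, 3), (2, 1), (2, 4),
  (2, 10), (7, 22), (1, 3), (1, 23), (1, 10), (1, 5), (2, 9), (1, 3),
  (1, 4), (7, 2), (6, 2), (1, 4), (2, 10), (1, 2), (13, 13), (1, 3),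
  (1, 51), (1, 3), (1, 6), (4, 16), (2, 26), (1, 3), (1, 18), (3, 24),
  (1, 9), (1, 1), (2, 7), (3, 1), (4, 6), (1, 1), (1, 8), (6, 10),
  (2, 3), (12, 58), (4, 29), (37, 2), (1, 1), (1, 5), (1, 24), (1, 1),
  (1, 23), (2, 5), (1, 1), (1, 6), (2, 10), (2, 4), (32, 72), (1, 36),
  (4, 39), (1, 36), (1, 15), (1, 13), (37, 198), (1, 1), (5, 1), (2, 377),
  (1, 4), (2, 7), (1, 1), (1, 4), (2, 41), (1, 4), (2, 33), (1, 4),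
  (2, 7), (1, 1), (1, 4), (2, 15), (1, 57), (1, 4), (2, 67), (2, 32),
  (3, 26), (6, 86), (2, 6), (2, 640), (1, 28), (3, 89), (7, 22), (9, 24),
  (9, 20), (12, 13), (1, 3), (1, 2), (12, 94), (2, 10), (6, 10), (6, 14),
  (1, 11), (6, 89), (7, 43), (5, 70), (10, 31), (1, 12), (4, 12), (4, 1),
  (3, 42), (2, 5), (11, 44), (4, 26), (6, 11), (3, 62), (2, 65), (1, 29),
  (2, 11), (6, 10), (6, 14), (2, 31), (49, 77), (3, 47), (1, 116), (8, 60),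
  (3, 15), (3, 60), (7, 43), (2, 11), (8, 43), (5, 534), (2, 6), (2, 38),
  (2, 6), (2, 8), (1, 1), (1, 1), (1, 1), (1, 31), (2, 53), (1, 15),
  (1, 14), (2, 6), (1, 19), (2, 3), (1, 9), (17, 24), (8, 47), (17, 2),
  (2, 27), (1, 13), (3, 33), (15, 33), (15, 140), (4, 663), (25, 11), (21, 1812),
  (2, 32), (1, 349), (5, 45), (1, 1), (5, 1), (2, 56), (7, 2), (14, 24),
  (9, 7), (1, 7), (1, 7), (1, 7), (1, 7), (1, 7), (1, 7), (1, 7),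
  (1, 126), (34, 26), (1, 89), (12, 214), (26, 12), (5, 63), (1, 86), (2, 103),
  (5, 43), (1, 94), (1, 84), (12, 47), (1, 29293), (3, 55), (9, 348), (20, 184),
  (8, 203), (5, 2), (1, 1), (1, 5), (24, 59), (3, 10), (6, 56), (8, 70),
  (8, 12), (6, 116), (11, 30), (3, 78), (1, 11), (4, 33), (1, 55), (9, 14),
  (2, 10), (2, 103), (24, 28), (10, 6), (2, 6), (2, 6), (9, 7), (1, 7),
  (1, 60), (4, 126), (2, 10), (6, 11172), (12, 23), (4, 49), (8452, 366), (2, 106),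
  (38, 7), (12, 5), (5, 26), (1, 5), (1, 1), (1, 2), (1, 2), (1, 125),
  (16, 445), (2, 54), (7, 1), (32, 42), (6, 51), (1, 19), (1, 4), (4, 5),
  (1, 135), (4, 190), (3, 6), (2, 6), (2, 6), (2, 3), (3, 7), (1, 7),
  (13, 2), (2, 12), (1, 26), (1, 19), (1, 2), (1, 15), (2, 14), (34, 123),
  (5, 3), (4, 45), (3, 88), (1, 13), (3, 1), (47, 46), (130, 29), (3, 49),
  (15, 28), (4, 36), (9, 30), (5, 43), (5, 30), (1, 37), (4, 14), (42, 158),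
  (2, 10), (6, 36), (4, 36), (4, 40), (8, 52), (11, 12), (1, 15), (1, 7),
  (1, 2), (1, 11), (1, 15), (1, 7), (1, 2), (67, 311), (9, 22), (10, 8),
  (24, 6), (1, 42), (1, 9), (69, 6), (2, 1), (1, 44), (1, 2), (3, 1),
  (2, 23), (1, 72), (8, 9), (48, 19), (1, 2), (5, 33), (3, 27), (5, 1),
  (64, 56), (4, 20), (2, 50), (1, 2), (5, 8), (1, 3), (1, 29), (2, 3),
  (4, 10), (7, 9), (7, 64), (32, 39), (4, 12), (9, 54), (3, 29), (2, 27),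
  (5, 26), (7, 4), (12, 7), (80, 73), (55, 51), (13, 51), (7, 46), (8, 10),
  (294, 31), (1, 42), (1, 3), (2, 2), (78, 40), (8, 42), (22, 26), (38, 28),
  (20, 23), (9, 78), (4, 36), (9, 62), (1, 5), (13, 25), (7, 10), (6, 53),
  (1, 18), (8, 39), (9, 96), (1, 20), (11, 18), (1, 44), (65, 7), (1, 1),
  (1, 4), (1, 15), (1, 11), (6, 59), (5, 10), (6, 4), (1, 8), (2, 2),
  (2, 22), (1, 7), (1, 2), (1, 5), (1, 10), (2, 2), (2, 3), (2, 1),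
  (6, 1), (5, 7), (2, 7), (3, 5), (139, 92), (1, 5), (30, 72), (8, 10),
  (166, 54), (2, 38), (34, 69), (11, 10), (6, 13), (19, 58), (6, 10), (54, 27),
  (2, 15), (4, 23), (185, 60), (100, 83), (12, 8), (2, 1), (2, 8), (1, 2),
  (1, 30), (1, 2), (2, 12), (9, 10), (70, 8), (2, 46), (2, 11), (27, 72),
  (8, 83), (13, 73), (263, 9), (1, 45), (1, 14), (10, 29), (3, 32), (2, 22),
  (1, 14), (73, 7), (1, 2), (1, 44), (3, 1), (1, 2), (1, 9), (8, 10),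
  (6, 6), (1, 2), (1, 37), (1, 2), (1, 6), (7, 10), (310, 25), (183, 1),
  (15, 50), (13, 923), (102, 111), (1, 5), (11, 196), (2636, 99), (13, 1071), (4049, 583),
  (8633, 569), (7, 31), (1, 10), (4, 81), (1, 10), (6, 30), (2, 6), (10, 70),
  (10, 10), (1, 7), (1, 21), (5, 19), (688, 91), (101, 75), (4, 57), (7, 17),
  (64, 5), (11, 2), (14, 6136), (8, 1238), (42, 9), (8935, 4), (1, 7), (1, 2),
  (1, 291), (45, 3), (17, 4), (8, 396), (2308, 107), (5, 13), (3, 9), (7, 10),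
  (2, 4), (4704, 46), (2, 23), (9, 116), (60, 246), (10, 39), (2, 74), (8, 112),
  (21, 70), (154, 20), (12, 87), (9, 25), (135, 85), (1, 71), (1, 2), (2, 1),
  (2, 2), (2, 4), (1, 12), (1, 1), (1, 7), (1, 65), (1, 4), (2, 8),
  (1, 7), (1, 28), (1, 4), (1, 5), (1, 1), (3, 7), (1, 340), (2, 292),
  (2, 702), (15, 5), (1, 15), (1104, 31), (225, 7), (1, 17), (2, 7), (1, 2),
  (1, 5), (213, 45), (3, 14), (2, 10), (4, 2), (320, 31), (17, 58), (5, 1),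
  (1248, 7), (1, 4), (1, 2), (1, 15), (1, 197), (2, 16), (41, 76), (4, 10),
  (4, 2), (785, 68), (76, 61), (194, 4), (1, 27), (1, 2), (1, 1), (2, 1),
  (1, 10), (1, 4), (1, 1), (1, 1), (6, 1), (4, 1), (1, 1), (1, 1),
  (1, 3), (1, 2), (1, 1), (2, 1), (1, 1), (1, 1), (1, 1), (1, 1),
  (1, 2), (1, 1), (2, 4), (1, 7), (1, 4), (1, 4), (1, 1), (1, 10),
  (1, 17), (5, 3), (1, 5), (1, 17), (52, 2), (270, 44), (4, 100), (12, 15),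
  (2, 15), (1, 15), (1, 37), (10, 174), (56, 29), (13, 44), (4, 9), (7, 2),
  (14, 6), (154, 984), (5, 16), (3, 13), (3, 116), (12, 89), (7, 12), (4, 1),
  (15, 12), (4, 56), (8, 10), (6, 40), (8, 30), (2, 2), (78, 340), (12, 14),
  (2, 5), (3, 5), (3, 7), (9, 29), (3, 11), (5, 6), (10, 10), (6, 8),
  (8, 7), (9, 147), (1, 55), (37, 10), (1030, 42720), (32, 4153), (7, 222), (2, 5762),
  (14, 7473), (3103, 542), (1506, 4939), (716213, 240)
]

-- loop body of B's for-loop, transliterated (state = (result, pos))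
def deltaF (lower_bound : Int) (upper_bound : Int) (st : List (List Int) × Int) (d : Int × Int) :
    List (List Int) × Int :=
  let start := st.2 + d.1
  let e := start + d.2
  let lo := if start > lower_bound then start else lower_bound
  let hi := if e < upper_bound then e else upper_bound
  (if lo < hi then st.1 ++ [[lo, hi]] else st.1, e)

def printable_ranges_alt (lower_bound : Int) (upper_bound : Int) : List (List Int) :=
  (pvDeltas.foldl (deltaF lower_bound upper_bound) ([], 0)).1

-- ===== PRECONDITION & SPEC =====
-- Pre_ excludes exactly the inputs where Python A raises ValueError: a nonempty range containing a
-- code point outside [0, 0x110000), on which chr(c) raises.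
def Pre_printable_ranges (lower_bound : Int) (upper_bound : Int) : Prop :=
  upper_bound ≤ lower_bound ∨ (0 ≤ lower_bound ∧ upper_bound ≤ 1114112)

instance (lower_bound : Int) (upper_bound : Int) : Decidable (Pre_printable_ranges lower_bound upper_bound) := by
  unfold Pre_printable_ranges; infer_instance

def pvWitness_printable_ranges : Int × Int := (30, 200)

def Spec_printable_ranges (lower_bound : Int) (upper_bound : Int) (out : List (List Int)) : Prop := out = printable_ranges_alt lower_bound upper_bound
instance (lower_bound : Int) (upper_bound : Int) (out : List (List Int)) : Decidable (Spec_printable_ranges lower_bound upper_bound out) := by unfold Spec_printable_ranges; infer_instance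

-- ===== CLAIM (what is proved, stated in full; the proofs are below) =====
def Claim_equal_printable_ranges : Prop := ∀ (lower_bound : Int) (upper_bound : Int), Dom_printable_ranges lower_bound upper_bound → Pre_printable_ranges lower_bound upper_bound → Spec_printable_ranges lower_bound upper_bound (printable_ranges lower_bound upper_bound)

-- ===== LEMMAS AND PROOFS =====

-- generic printability predicate induced by a table of ranges
def pT (t : List (Int × Int)) (c : Int) : Bool := t.any (fun r => decide (r.1 ≤ c) && decide (c < r.2))

-- A's whole computation, generic in the predicate
def scanRes (p : Int → Bool) (lb ub : Int) : List (List Int) :=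
  match (PySem.List.pyRange lb ub 1).foldl (scanF p) ([], none) with
  | (ranges, some s) => ranges ++ [[s, ub]]
  | (ranges, none) => ranges

lemma printable_ranges_eq (lb ub : Int) : printable_ranges lb ub = scanRes (pT pvTable) lb ub := rfl

-- proof-side clipping of an absolute table (intermediate between the two ports)
def clipF (lower_bound : Int) (upper_bound : Int) (res : List (List Int)) (r : Int × Int) :
    List (List Int) :=
  let lo := if r.1 > lower_bound then r.1 else lower_bound
  let hi := if r.2 < upper_bound then r.2 else upper_bound
  if lo < hi then res ++ [[lo, hi]] else res

-- decoding the delta table into an absolute table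
def decodeD : Int → List (Int × Int) → List (Int × Int)
  | _, [] => []
  | pos, d :: t => (pos + d.1, pos + d.1 + d.2) :: decodeD (pos + d.1 + d.2) t

set_option maxRecDepth 8000 in
lemma decode_pvDeltas : decodeD 0 pvDeltas = pvTable := by decide

-- B's fold over the delta table is exactly the clip fold over the decoded table
lemma delta_eq_clip (lb ub : Int) :
    ∀ (t : List (Int × Int)) (acc : List (List Int)) (pos : Int),
      (t.foldl (deltaF lb ub) (acc, pos)).1 = (decodeD pos t).foldl (clipF lb ub) acc := by
  intro t
  induction t with
  | nil => intro acc pos; rfl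
  | cons d t ih =>
    intro acc pos
    rw [List.foldl_cons, decodeD, List.foldl_cons]
    have hstep : deltaF lb ub (acc, pos) d =
        (clipF lb ub acc (pos + d.1, pos + d.1 + d.2), pos + d.1 + d.2) := by
      simp only [deltaF, clipF]
    rw [hstep]
    exact ih _ _

-- a linear Boolean check of the table: starts increase, each range nonempty, ranges separated
def sepOK : Int → List (Int × Int) → Bool
  | _, [] => true
  | prev, r :: t => decide (prev < r.1) && decide (r.1 < r.2) && sepOK r.2 t

set_option maxRecDepth 8000 in
lemma tbl_ok : sepOK (-1) pvTable = true := by decide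

lemma sepOK_facts : ∀ (t : List (Int × Int)) (prev : Int), sepOK prev t = true →
    (∀ r ∈ t, prev < r.1 ∧ r.1 < r.2) ∧ t.Pairwise (fun a b : Int × Int => a.2 < b.1) := by
  intro t
  induction t with
  | nil => intro _ _; exact ⟨by simp, List.Pairwise.nil⟩
  | cons r t ih =>
    intro prev h
    simp only [sepOK, Bool.and_eq_true, decide_eq_true_eq] at h
    obtain ⟨⟨h1, h2⟩, h3⟩ := h
    obtain ⟨hlt, hpw⟩ := ih r.2 h3
    refine ⟨?_, List.pairwise_cons.mpr ⟨fun x hx => (hlt x hx).1, hpw⟩⟩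
    intro x hx
    rcases List.mem_cons.mp hx with he | he
    · subst he; exact ⟨h1, h2⟩
    · have := hlt x he; omega

lemma tbl_lt : ∀ r ∈ pvTable, r.1 < r.2 :=
  fun r hr => ((sepOK_facts pvTable (-1) tbl_ok).1 r hr).2

lemma tbl_pairwise : pvTable.Pairwise (fun a b : Int × Int => a.2 < b.1) :=
  (sepOK_facts pvTable (-1) tbl_ok).2

lemma pair_seg (acc : List (List Int)) (x y x' y' : Int) (hx : x = x') (hy : y = y') :
    acc ++ [[x, y]] = acc ++ [[x', y']] := by rw [hx, hy]

lemma pT_cons (r : Int × Int) (t : List (Int × Int)) (c : Int) :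
    pT (r :: t) c = ((decide (r.1 ≤ c) && decide (c < r.2)) || pT t c) := by
  simp [pT]

lemma pT_false (t : List (Int × Int)) (c : Int) (h : ∀ r ∈ t, c < r.1 ∨ r.2 ≤ c) :
    pT t c = false := by
  simp only [pT, List.any_eq_false, Bool.and_eq_true, decide_eq_true_eq, not_and]
  intro r hr h1
  have := h r hr
  omega

-- scanF facts
lemma scanF_false (p : Int → Bool) (acc : List (List Int)) (c : Int) (h : p c = false) :
    scanF p (acc, none) c = (acc, none) := by simp [scanF, h]

lemma scan_false (p : Int → Bool) :
    ∀ (L : List Int) (acc : List (List Int)), (∀ c ∈ L, p c = false) →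
      L.foldl (scanF p) (acc, none) = (acc, none) := by
  intro L
  induction L with
  | nil => intro acc _; rfl
  | cons c L ih =>
    intro acc h
    rw [List.foldl_cons, scanF_false p acc c (h c (by simp))]
    exact ih acc (fun x hx => h x (by simp [hx]))

lemma scan_true_some (p : Int → Bool) :
    ∀ (L : List Int) (acc : List (List Int)) (s : Int), (∀ c ∈ L, p c = true) →
      L.foldl (scanF p) (acc, some s) = (acc, some s) := by
  intro L
  induction L with
  | nil => intro acc s _; rfl
  | cons c L ih =>
    intro acc s h
    have hc : p c = true := h c (by simp)
    rw [List.foldl_cons]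
    have : scanF p (acc, some s) c = (acc, some s) := by simp [scanF, hc]
    rw [this]
    exact ih acc s (fun x hx => h x (by simp [hx]))

lemma scanF_fst (p : Int → Bool) (acc : List (List Int)) (o : Option Int) (c : Int) :
    scanF p (acc, o) c = (acc ++ (scanF p ([], o) c).1, (scanF p ([], o) c).2) := by
  cases o <;> by_cases h : p c <;> simp [scanF, h]

lemma scan_prefix (p : Int → Bool) :
    ∀ (L : List Int) (acc : List (List Int)) (o : Option Int),
      L.foldl (scanF p) (acc, o) =
        (acc ++ (L.foldl (scanF p) ([], o)).1, (L.foldl (scanF p) ([], o)).2) := by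
  intro L
  induction L with
  | nil => intro acc o; simp
  | cons c L ih =>
    intro acc o
    rw [List.foldl_cons, List.foldl_cons, scanF_fst]
    rcases hst : scanF p ([], o) c with ⟨X, o'⟩
    rw [ih (acc ++ X) o', ih X o', List.append_assoc]

lemma scan_congr (p q : Int → Bool) :
    ∀ (L : List Int) (st : List (List Int) × Option Int), (∀ c ∈ L, p c = q c) →
      L.foldl (scanF p) st = L.foldl (scanF q) st := by
  intro L
  induction L with
  | nil => intro st _; rfl
  | cons c L ih =>
    intro st h
    rw [List.foldl_cons, List.foldl_cons]
    have hc : scanF p st c = scanF q st c := by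
      unfold scanF; rw [h c (by simp)]
    rw [hc]
    exact ih _ (fun x hx => h x (by simp [hx]))

lemma foldl_scan_allTrue (p : Int → Bool) (a b : Int) (acc : List (List Int)) (hab : a < b)
    (h : ∀ c ∈ PySem.List.pyRange a b 1, p c = true) :
    (PySem.List.pyRange a b 1).foldl (scanF p) (acc, none) = (acc, some a) := by
  rw [PySem.List.pyRange_one_cons hab, List.foldl_cons]
  have ha : p a = true := h a (by rw [PySem.List.mem_pyRange_one]; omega)
  have : scanF p (acc, none) a = (acc, some a) := by simp [scanF, ha]
  rw [this]
  apply scan_true_some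
  intro c hc
  apply h
  rw [PySem.List.mem_pyRange_one] at hc ⊢
  omega

-- clip facts
lemma clipF_id (lb ub : Int) (acc : List (List Int)) (r : Int × Int)
    (h : min r.2 ub ≤ max r.1 lb) : clipF lb ub acc r = acc := by
  simp only [clipF]
  split_ifs <;> first | rfl | omega

lemma clipF_val (lb ub : Int) (acc : List (List Int)) (r : Int × Int)
    (h : max r.1 lb < min r.2 ub) :
    clipF lb ub acc r = acc ++ [[max r.1 lb, min r.2 ub]] := by
  simp only [clipF]
  split_ifs <;> first | (exact pair_seg _ _ _ _ _ (by omega) (by omega)) | omega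

lemma clip_acc (lb ub : Int) :
    ∀ (t : List (Int × Int)) (acc : List (List Int)),
      t.foldl (clipF lb ub) acc = acc ++ t.foldl (clipF lb ub) [] := by
  intro t
  induction t with
  | nil => intro acc; simp
  | cons r t ih =>
    intro acc
    rw [List.foldl_cons, List.foldl_cons]
    by_cases h : max r.1 lb < min r.2 ub
    · rw [clipF_val lb ub acc r h, clipF_val lb ub [] r h, ih (acc ++ _),
        ih ([] ++ _), List.nil_append, List.append_assoc]
    · rw [clipF_id lb ub acc r (by omega), clipF_id lb ub [] r (by omega), ih]

lemma clip_cons (lb ub : Int) (r : Int × Int) (t : List (Int × Int)) :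
    (r :: t).foldl (clipF lb ub) [] = clipF lb ub [] r ++ t.foldl (clipF lb ub) [] := by
  rw [List.foldl_cons, clip_acc]

lemma clip_nil_of (lb ub : Int) (t : List (Int × Int))
    (h : ∀ r ∈ t, min r.2 ub ≤ max r.1 lb) : t.foldl (clipF lb ub) [] = [] := by
  induction t with
  | nil => rfl
  | cons r t ih =>
    rw [clip_cons, clipF_id lb ub [] r (h r (by simp)), List.nil_append]
    exact ih (fun x hx => h x (by simp [hx]))

lemma clip_congr (lb1 lb2 ub : Int) :
    ∀ (t : List (Int × Int)) (acc : List (List Int)),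
      (∀ acc' (r : Int × Int), r ∈ t → clipF lb1 ub acc' r = clipF lb2 ub acc' r) →
      t.foldl (clipF lb1 ub) acc = t.foldl (clipF lb2 ub) acc := by
  intro t
  induction t with
  | nil => intro acc _; rfl
  | cons r t ih =>
    intro acc h
    rw [List.foldl_cons, List.foldl_cons, h acc r (by simp)]
    exact ih _ (fun a x hx => h a x (by simp [hx]))

-- the main generic theorem: A's scan over [lb, ub) equals the clip of the table,
-- for any table of nonempty, strictly separated ranges.
theorem scan_eq_clip (ub : Int) :
    ∀ (t : List (Int × Int)), (∀ r ∈ t, r.1 < r.2) →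
      t.Pairwise (fun a b : Int × Int => a.2 < b.1) →
      ∀ lb, scanRes (pT t) lb ub = t.foldl (clipF lb ub) [] := by
  intro t
  induction t with
  | nil =>
    intro _ _ lb
    unfold scanRes
    rw [scan_false (pT []) _ [] (fun c _ => rfl)]
    rfl
  | cons r t ih =>
    intro hlt hpw lb
    have hse : r.1 < r.2 := hlt r (by simp)
    have hlt' : ∀ x ∈ t, x.1 < x.2 := fun x hx => hlt x (by simp [hx])
    have hsep : ∀ x ∈ t, r.2 < x.1 := (List.pairwise_cons.mp hpw).1
    have hpw' := (List.pairwise_cons.mp hpw).2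
    by_cases h0 : ub ≤ lb
    · unfold scanRes
      rw [PySem.List.pyRange_one_eq_nil h0, List.foldl_nil]
      exact (clip_nil_of lb ub _ (fun x _ => by omega)).symm
    push_neg at h0
    by_cases h1 : ub ≤ r.1
    · have hF : ∀ c ∈ PySem.List.pyRange lb ub 1, pT (r :: t) c = false := by
        intro c hc
        rw [PySem.List.mem_pyRange_one] at hc
        apply pT_false
        intro x hx
        rcases List.mem_cons.mp hx with h | h
        · subst h; omega
        · have := hsep x h; omega
      unfold scanRes
      rw [scan_false _ _ [] hF]
      refine (clip_nil_of lb ub _ (fun x hx => ?_)).symm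
      rcases List.mem_cons.mp hx with h | h
      · subst h; omega
      · have := hsep x h; omega
    push_neg at h1
    by_cases h2 : r.2 ≤ lb
    · have hcong : ∀ c ∈ PySem.List.pyRange lb ub 1, pT (r :: t) c = pT t c := by
        intro c hc
        rw [PySem.List.mem_pyRange_one] at hc
        rw [pT_cons]
        have : decide (c < r.2) = false := by simp; omega
        simp [this]
      have hscan : scanRes (pT (r :: t)) lb ub = scanRes (pT t) lb ub := by
        unfold scanRes
        rw [scan_congr _ _ _ _ hcong]
      rw [hscan, ih hlt' hpw' lb, clip_cons, clipF_id lb ub [] r (by omega), List.nil_append]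
    push_neg at h2
    -- main case: the head range [r.1, r.2) intersects [lb, ub)
    have hab : max r.1 lb < min r.2 ub := by omega
    have hsplit : PySem.List.pyRange lb ub 1 =
        PySem.List.pyRange lb (max r.1 lb) 1 ++ (PySem.List.pyRange (max r.1 lb) (min r.2 ub) 1
          ++ PySem.List.pyRange (min r.2 ub) ub 1) := by
      rw [← PySem.List.pyRange_one_append (max r.1 lb) (min r.2 ub) ub (by omega) (by omega),
        ← PySem.List.pyRange_one_append lb (max r.1 lb) ub (by omega) (by omega)]
    have hF1 : ∀ c ∈ PySem.List.pyRange lb (max r.1 lb) 1, pT (r :: t) c = false := by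
      intro c hc
      rw [PySem.List.mem_pyRange_one] at hc
      apply pT_false
      intro x hx
      rcases List.mem_cons.mp hx with h | h
      · subst h; omega
      · have := hsep x h; omega
    have hT : ∀ c ∈ PySem.List.pyRange (max r.1 lb) (min r.2 ub) 1, pT (r :: t) c = true := by
      intro c hc
      rw [PySem.List.mem_pyRange_one] at hc
      rw [pT_cons]
      have hx1 : decide (r.1 ≤ c) = true := by simp; omega
      have hx2 : decide (c < r.2) = true := by simp; omega
      simp [hx1, hx2]
    unfold scanRes
    rw [hsplit, List.foldl_append, List.foldl_append,
      scan_false _ _ [] hF1, foldl_scan_allTrue _ _ _ [] hab hT]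
    by_cases h3 : r.2 < ub
    · have hb : min r.2 ub = r.2 := by omega
      rw [hb]
      rw [PySem.List.pyRange_one_cons (show r.2 < ub by omega), List.foldl_cons]
      have hpe : pT (r :: t) r.2 = false := by
        apply pT_false
        intro x hx
        rcases List.mem_cons.mp hx with h | h
        · subst h; omega
        · have := hsep x h; omega
      have hstep : scanF (pT (r :: t)) ([], some (max r.1 lb)) r.2 =
          ([[max r.1 lb, r.2]], none) := by simp [scanF, hpe]
      rw [hstep]
      have hcong3 : ∀ c ∈ PySem.List.pyRange (r.2 + 1) ub 1, pT (r :: t) c = pT t c := by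
        intro c hc
        rw [PySem.List.mem_pyRange_one] at hc
        rw [pT_cons]
        have : decide (c < r.2) = false := by simp; omega
        simp [this]
      rw [scan_prefix, scan_congr _ _ _ _ hcong3]
      have hihv := ih hlt' hpw' (r.2 + 1)
      unfold scanRes at hihv
      have hclipc : t.foldl (clipF (r.2 + 1) ub) [] = t.foldl (clipF lb ub) [] := by
        apply clip_congr
        intro acc' x hx
        have hx1 := hsep x hx
        simp only [clipF]
        split_ifs <;> first | rfl | omega | (exact pair_seg _ _ _ _ _ (by omega) (by omega))
      rw [clip_cons, clipF_val lb ub [] r (by omega), hb, List.nil_append, ← hclipc, ← hihv]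
      rcases hY : (PySem.List.pyRange (r.2 + 1) ub 1).foldl (scanF (pT t)) ([], none) with ⟨Y, o⟩
      cases o <;> simp
    · have hb : min r.2 ub = ub := by omega
      rw [hb, PySem.List.pyRange_one_eq_nil (le_refl ub), List.foldl_nil]
      rw [clip_cons, clipF_val lb ub [] r (by omega), hb, List.nil_append,
        clip_nil_of lb ub t (fun x hx => by have := hsep x hx; omega), List.append_nil]
      rfl

-- B's port equals the clip fold over pvTable
lemma alt_eq_clip (lb ub : Int) :
    printable_ranges_alt lb ub = pvTable.foldl (clipF lb ub) [] := by
  unfold printable_ranges_alt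
  rw [delta_eq_clip lb ub pvDeltas [] 0, decode_pvDeltas]

-- ===== VERDICT (by name: the statement is the Claim_ definition above) =====
theorem printable_ranges_spec : Claim_equal_printable_ranges := by
  intro lower_bound upper_bound _ _
  show printable_ranges lower_bound upper_bound = printable_ranges_alt lower_bound upper_bound
  rw [printable_ranges_eq, alt_eq_clip]
  exact scan_eq_clip upper_bound pvTable tbl_lt tbl_pairwise lower_bound
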